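-- pv_equiv track=rewrite | github.com/Somesh-Kumar-Yadav/assignment | animation/part-2/f.py | solve
-- ===== SOURCE A (Python) =====
-- def solve(h,height):
--     l = 0
--     r = 0
--     val = True
--     c  = 0
--     for i in range(len(height)):
--         if height[i] >= h:
--             if val :
--                 l = i
--                 val = False
--             r = i
--     for i in range(l,r):
--         if height[i] < h:
--             c += 1
--     return c
-- ===== SOURCE B (Python) =====
-- def solve(h, height):
--     idx = [i for i, x in enumerate(height) if x >= h]
--     if not idx:
--         return 0
--     return (idx[-1] - idx[0] + 1) - len(idx)
-- ===== Notes on version B (the rewrite author's own statement) =====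
-- stated objective: simpler
-- what changed: Instead of A's two-phase scan (stateful first/last tracking loop, then a second counting loop over range(l,r)), B builds the list of indices with height >= h in one comprehension and returns the closed-form count (idx[-1]-idx[0]+1)-len(idx).
import Mathlib
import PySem

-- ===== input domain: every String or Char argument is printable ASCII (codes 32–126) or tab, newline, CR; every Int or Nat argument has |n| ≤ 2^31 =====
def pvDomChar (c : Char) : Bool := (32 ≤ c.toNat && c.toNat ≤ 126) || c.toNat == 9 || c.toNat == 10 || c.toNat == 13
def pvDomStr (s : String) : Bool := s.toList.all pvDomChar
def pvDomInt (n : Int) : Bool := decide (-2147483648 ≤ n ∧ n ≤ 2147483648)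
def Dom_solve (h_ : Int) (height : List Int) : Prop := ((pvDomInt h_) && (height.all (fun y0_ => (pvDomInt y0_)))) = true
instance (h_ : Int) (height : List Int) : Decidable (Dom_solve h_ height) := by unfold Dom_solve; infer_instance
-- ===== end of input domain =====

-- ===== PORT A =====
-- B replaces A's second counting loop by a closed-form arithmetic count over the ≥h index list (alternative decomposition, no speed claim).
def solve (h_ : Int) (height : List Int) : Int :=
  -- first loop: find first/last index with height[i] >= h  (height[i] is in range, ported as pyGetD)
  let st := (PySem.List.pyRange 0 height.length 1).foldl
    (fun (st : Int × Int × Bool) i =>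
      if PySem.List.pyGetD height i 0 ≥ h_ then
        ((if st.2.2 then i else st.1), i, false)
      else st)
    (0, 0, true)
  -- second loop: count height[i] < h for i in range(l, r)
  (PySem.List.pyRange st.1 st.2.1 1).foldl
    (fun c i => if PySem.List.pyGetD height i 0 < h_ then c + 1 else c) 0

-- ===== PORT B =====
def solve_alt (h_ : Int) (height : List Int) : Int :=
  let idx := ((PySem.List.enumerate height).filter (fun p => p.2 ≥ h_)).map (fun p => p.1)
  if idx = [] then 0
  else (PySem.List.pyGetD idx (-1) 0 - PySem.List.pyGetD idx 0 0 + 1) - idx.length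

-- ===== PRECONDITION & SPEC =====
def Spec_solve (h_ : Int) (height : List Int) (out : Int) : Prop := out = solve_alt h_ height
instance (h_ : Int) (height : List Int) (out : Int) : Decidable (Spec_solve h_ height out) := by unfold Spec_solve; infer_instance

-- ===== CLAIM (what is proved, stated in full; the proofs are below) =====
def Claim_equal_solve : Prop := ∀ (h_ : Int) (height : List Int), Dom_solve h_ height → Spec_solve h_ height (solve h_ height)

-- ===== LEMMAS AND PROOFS =====

-- the indices of height with value >= h, as a filter of the index range
def pvJ (h_ : Int) (height : List Int) : List Int :=
  (PySem.List.pyRange 0 height.length 1).filter (fun j => decide (PySem.List.pyGetD height j 0 ≥ h_))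

lemma pvIdx_eq_pvJ (h_ : Int) (height : List Int) :
    ((PySem.List.enumerate height).filter (fun p => p.2 ≥ h_)).map (fun p => p.1)
      = pvJ h_ height := by
  rw [PySem.List.enumerate_eq_map_pyRange height 0, List.filter_map, List.map_map]
  simp [pvJ, PySem.List.len, Function.comp_def]

lemma pvLoop1_char (p : Int → Prop) [DecidablePred p] :
    ∀ (L : List Int) (l r : Int) (val : Bool),
    L.foldl (fun (st : Int × Int × Bool) i =>
        if p i then ((if st.2.2 then i else st.1), i, false) else st) (l, r, val)
    = (if (L.filter (fun i => decide (p i))) = [] then (l, r, val)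
       else ((if val then (L.filter (fun i => decide (p i))).headD 0 else l),
             (L.filter (fun i => decide (p i))).getLastD 0, false)) := by
  intro L
  induction L with
  | nil => intro l r val; simp
  | cons x L ih =>
    intro l r val
    by_cases hx : p x
    · simp only [List.foldl_cons, if_pos hx, List.filter_cons, decide_eq_true hx]
      rw [ih]
      rcases hF : L.filter (fun i => decide (p i)) with _ | ⟨k, ks⟩ <;>
        cases val <;> simp
    · simp only [List.foldl_cons, if_neg hx, List.filter_cons]
      rw [ih]
      simp [hx]

lemma pvHeadD_le (K : List Int) (hp : K.Pairwise (· < ·)) : ∀ j ∈ K, K.headD 0 ≤ j := by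
  cases K with
  | nil => simp
  | cons a l =>
    intro j hj
    rcases List.mem_cons.mp hj with h | h
    · simp [h]
    · exact le_of_lt ((List.pairwise_cons.mp hp).1 j h)

lemma pvGetLastD_mem (K : List Int) (h : K ≠ []) : K.getLastD 0 ∈ K := by
  cases K with
  | nil => simp at h
  | cons a l =>
    simp [List.getLastD_eq_getLast?, List.getLast?_eq_some_getLast]

lemma pvLe_getLastD (K : List Int) (hp : K.Pairwise (· < ·)) : ∀ j ∈ K, j ≤ K.getLastD 0 := by
  induction K with
  | nil => simp
  | cons a l ih =>
    intro j hj
    rcases List.mem_cons.mp hj with h | h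
    · subst h
      cases l with
      | nil => simp
      | cons b m =>
        have hb : (b :: m).getLastD 0 ∈ b :: m := pvGetLastD_mem _ (by simp)
        exact le_of_lt ((List.pairwise_cons.mp hp).1 _ hb)
    · cases l with
      | nil => simp at h
      | cons b m =>
        exact ih (List.pairwise_cons.mp hp).2 j h


lemma pvMem_pvJ (h_ : Int) (height : List Int) (j : Int) :
    j ∈ pvJ h_ height ↔ (0 ≤ j ∧ j < (height.length : Int)) ∧ h_ ≤ PySem.List.pyGetD height j 0 := by
  simp [pvJ, List.mem_filter, PySem.List.mem_pyRange_one]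

lemma pvJ_pairwise (h_ : Int) (height : List Int) : (pvJ h_ height).Pairwise (· < ·) :=
  (PySem.List.pairwise_lt_pyRange_one 0 height.length).filter _

-- ===== VERDICT (by name: the statement is the Claim_ definition above) =====
theorem solve_spec : Claim_equal_solve := by
  intro h_ height _dom
  unfold Spec_solve solve solve_alt
  rw [pvIdx_eq_pvJ]
  rw [pvLoop1_char (fun i => PySem.List.pyGetD height i 0 ≥ h_) (PySem.List.pyRange 0 height.length 1) 0 0 true]
  have hJ : (PySem.List.pyRange 0 (height.length : Int) 1).filter
      (fun i => decide (PySem.List.pyGetD height i 0 ≥ h_)) = pvJ h_ height := rfl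
  rw [hJ]
  by_cases hne : pvJ h_ height = []
  · simp [hne, PySem.List.pyRange_one_eq_nil]
  · simp only [if_neg hne, if_true]
    have hpw : (pvJ h_ height).Pairwise (· < ·) := pvJ_pairwise h_ height
    have hlmem : (pvJ h_ height).headD 0 ∈ pvJ h_ height := by
      obtain ⟨k, ks, hK⟩ := List.exists_cons_of_ne_nil hne
      rw [hK]; simp
    have hrmem : (pvJ h_ height).getLastD 0 ∈ pvJ h_ height := pvGetLastD_mem _ hne
    set l := (pvJ h_ height).headD 0 with hl
    set r := (pvJ h_ height).getLastD 0 with hr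
    have hlc := (pvMem_pvJ h_ height l).mp hlmem
    have hrc := (pvMem_pvJ h_ height r).mp hrmem
    have hlr : l ≤ r := pvLe_getLastD _ hpw l hlmem
    rw [PySem.List.foldl_ite_add_one (fun i => PySem.List.pyGetD height i 0 < h_)
      (PySem.List.pyRange l r 1) 0]
    -- count of >=h over the whole index range is the length of pvJ
    have hcount_all : (PySem.List.pyRange 0 (height.length : Int) 1).countP
        (fun j => decide (PySem.List.pyGetD height j 0 ≥ h_)) = (pvJ h_ height).length := by
      rw [List.countP_eq_length_filter]; rfl
    have hsplit1 := PySem.List.pyRange_one_append 0 l (height.length : Int) hlc.1.1 (by omega)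
    have hsplit2 := PySem.List.pyRange_one_append l (r + 1) (height.length : Int)
      (by omega) (by omega)
    have hzero1 : (PySem.List.pyRange 0 l 1).countP
        (fun j => decide (PySem.List.pyGetD height j 0 ≥ h_)) = 0 := by
      rw [List.countP_eq_zero]
      intro j hjm
      have hjr := (PySem.List.mem_pyRange_one).mp hjm
      simp only [decide_eq_true_eq]
      intro hq
      have hmem : j ∈ pvJ h_ height := (pvMem_pvJ h_ height j).mpr ⟨⟨hjr.1, by omega⟩, hq⟩
      have := pvHeadD_le _ hpw j hmem
      omega
    have hzero2 : (PySem.List.pyRange (r + 1) (height.length : Int) 1).countP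
        (fun j => decide (PySem.List.pyGetD height j 0 ≥ h_)) = 0 := by
      rw [List.countP_eq_zero]
      intro j hjm
      have hjr := (PySem.List.mem_pyRange_one).mp hjm
      simp only [decide_eq_true_eq]
      intro hq
      have hmem : j ∈ pvJ h_ height := (pvMem_pvJ h_ height j).mpr ⟨⟨by omega, hjr.2⟩, hq⟩
      have := pvLe_getLastD _ hpw j hmem
      omega
    have hmid : (PySem.List.pyRange l (r + 1) 1).countP
        (fun j => decide (PySem.List.pyGetD height j 0 ≥ h_)) = (pvJ h_ height).length := by
      rw [hsplit2] at hsplit1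
      rw [hsplit1, List.countP_append, List.countP_append, hzero1, hzero2] at hcount_all
      omega
    have hlast : PySem.List.pyRange l (r + 1) 1 = PySem.List.pyRange l r 1 ++ [r] :=
      PySem.List.pyRange_one_succ_right hlr
    have hq_range : (PySem.List.pyRange l r 1).countP
        (fun j => decide (PySem.List.pyGetD height j 0 ≥ h_)) + 1 = (pvJ h_ height).length := by
      rw [hlast, List.countP_append] at hmid
      simpa [hrc.2] using hmid
    have hcompl := List.length_eq_countP_add_countP
      (fun j => decide (PySem.List.pyGetD height j 0 ≥ h_)) (l := PySem.List.pyRange l r 1)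
    have hsame : (PySem.List.pyRange l r 1).countP
        (fun i => decide (PySem.List.pyGetD height i 0 < h_)) =
        (PySem.List.pyRange l r 1).countP
        (fun j => decide ¬ (decide (PySem.List.pyGetD height j 0 ≥ h_)) = true) := by
      apply List.countP_congr
      intro j _
      simp
    have hlen : (PySem.List.pyRange l r 1).length = (r - l).toNat :=
      PySem.List.length_pyRange_one l r
    -- B's closed form: idx[-1] and idx[0] are getLastD and headD
    have hgL : PySem.List.pyGetD (pvJ h_ height) (-1) 0 = r := by
      obtain ⟨k, ks, hK⟩ := List.exists_cons_of_ne_nil hne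
      rw [hr, hK, PySem.List.pyGetD_neg_one (xs := k :: ks) (d := 0) (by simp)]
      simp [List.getLastD_eq_getLast?, List.getLast?_eq_some_getLast]
    have hg0 : PySem.List.pyGetD (pvJ h_ height) 0 0 = l := by
      obtain ⟨k, ks, hK⟩ := List.exists_cons_of_ne_nil hne
      rw [hl, hK, PySem.List.pyGetD_zero_cons]
      simp
    rw [hgL, hg0, hsame] at *
    omega
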